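-- pv_equiv track=rewrite | github.com/elliesleightholm/Python | Computational Mathematics Module/Primes & Plots_10.py | squareprimes
-- ===== SOURCE A (Python) =====
-- def primelist(n):
--     primes = list(range(2,n+1))
--     for i in primes:
--         j=2
--         while i*j<= primes[-1]:
--             if i*j in primes:
--                 primes.remove(i*j)
--             j=j+1
--     return primes
--
-- def squareprimes(n):
--     mylist=[]
--     primes = list(range(2,n+1))
--     for i in primes:
--         j=2
--         while i*j<= primes[-1]:
--             if i*j in primes:
--                 primes.remove(i*j)
--             j=j+1
--     squares = primes
--     for k in squares:
--         if (k**2 + 1) in primelist(n**2 + 1):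
--             mylist.append(k**2 + 1)
--     return mylist
-- ===== SOURCE B (Python) =====
-- def squareprimes(n):
--     # Closed form: for any odd prime k, k*k + 1 is even and greater than 2,
--     # hence composite; so the only prime k with k*k + 1 prime is k = 2,
--     # which contributes 5. There is a prime <= n exactly when n >= 2.
--     return [5] if n >= 2 else []
-- ===== Notes on version B (the rewrite author's own statement) =====
-- stated objective: faster
-- what changed: Replaced the double removal-sieve (which re-sieves up to n^2+1 once per prime) by the closed form: for every odd prime k, k^2+1 is even and >2, so only k=2 ever qualifies and the answer is [5] iff n>=2.
import Mathlib
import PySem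

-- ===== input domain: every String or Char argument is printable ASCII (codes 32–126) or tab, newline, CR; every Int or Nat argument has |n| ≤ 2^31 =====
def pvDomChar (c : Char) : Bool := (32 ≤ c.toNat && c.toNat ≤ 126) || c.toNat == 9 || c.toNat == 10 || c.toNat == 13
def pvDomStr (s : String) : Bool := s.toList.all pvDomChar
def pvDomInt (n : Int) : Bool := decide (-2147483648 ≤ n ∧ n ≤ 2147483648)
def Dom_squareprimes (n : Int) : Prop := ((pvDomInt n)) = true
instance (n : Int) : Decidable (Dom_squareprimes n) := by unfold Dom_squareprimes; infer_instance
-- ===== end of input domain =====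

-- B replaces A's repeated removal-sieves by the closed form ([5] iff n ≥ 2): for every
-- odd prime k, k^2+1 is even and > 2, so only k = 2 ever qualifies.  (Return value only.)

-- ===== PORT A =====
-- `if v in primes: primes.remove(v)` (remove? is `some` exactly when v is present)
def pvRemoveIfMem (l : List Int) (v : Int) : List Int :=
  if l.contains v then (PySem.List.remove? l v).getD l else l

-- `j = 2; while i*j <= primes[-1]: …; j = j+1`.  primes[-1] is pyGet? l (-1); the `.getD 0`
-- arm is unreachable (the list is nonempty whenever Python evaluates primes[-1]).  The fuel
-- only makes the loop total; it is at least the iteration count on every reachable state.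
def pvSieveInner (fuel : Nat) (i j : Int) (l : List Int) : List Int :=
  match fuel with
  | 0 => l
  | f+1 =>
    if i * j ≤ (PySem.List.pyGet? l (-1)).getD 0 then
      pvSieveInner f i (j+1) (pvRemoveIfMem l (i*j))
    else l

-- `for i in primes:` over the list being mutated: Python's list iterator walks by index
def pvSieveOuter (fuel : Nat) (idx : Nat) (l : List Int) (g : Nat) : List Int :=
  match fuel with
  | 0 => l
  | f+1 =>
    match l[idx]? with
    | none => l
    | some i => pvSieveOuter f (idx+1) (pvSieveInner g i 2 l) g

def primelist (n : Int) : List Int :=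
  pvSieveOuter (n.toNat + 2) 0 (PySem.List.pyRange 2 (n+1) 1) (n.toNat + 2)

def squareprimes (n : Int) : List Int :=
  let primes := pvSieveOuter (n.toNat + 2) 0 (PySem.List.pyRange 2 (n+1) 1) (n.toNat + 2)
  primes.foldl
    (fun acc k => if (primelist (n^2 + 1)).contains (k^2 + 1) then acc ++ [k^2 + 1] else acc) []

-- ===== PORT B =====
def squareprimes_alt (n : Int) : List Int := if 2 ≤ n then [5] else []

-- ===== PRECONDITION & SPEC =====
def Spec_squareprimes (n : Int) (out : List Int) : Prop := out = squareprimes_alt n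
instance (n : Int) (out : List Int) : Decidable (Spec_squareprimes n out) := by unfold Spec_squareprimes; infer_instance

-- ===== CLAIM (what is proved, stated in full; the proofs are below) =====
def Claim_equal_squareprimes : Prop := ∀ (n : Int), Dom_squareprimes n → Spec_squareprimes n (squareprimes n)

-- ===== LEMMAS AND PROOFS =====

theorem pvSieveOuter_succ_none (f idx : Nat) (l : List Int) (g : Nat) (h : l[idx]? = none) :
    pvSieveOuter (f+1) idx l g = l := by
  simp [pvSieveOuter, h]

theorem pvSieveOuter_succ_some (f idx : Nat) (l : List Int) (g : Nat) (i : Int)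
    (h : l[idx]? = some i) :
    pvSieveOuter (f+1) idx l g = pvSieveOuter f (idx+1) (pvSieveInner g i 2 l) g := by
  simp [pvSieveOuter, h]

theorem pvRemoveIfMem_sublist (l : List Int) (v : Int) : (pvRemoveIfMem l v).Sublist l := by
  unfold pvRemoveIfMem
  by_cases h : l.contains v
  · rw [if_pos h, PySem.List.remove?_eq_some_erase l v (by simpa using h)]
    exact List.erase_sublist
  · rw [if_neg h]

theorem mem_pvRemoveIfMem_iff (l : List Int) (v x : Int) (hnd : l.Nodup) :
    x ∈ pvRemoveIfMem l v ↔ x ∈ l ∧ x ≠ v := by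
  unfold pvRemoveIfMem
  by_cases h : l.contains v
  · rw [if_pos h, PySem.List.remove?_eq_some_erase l v (by simpa using h)]
    simp [hnd.mem_erase_iff, and_comm]
  · rw [if_neg h]
    have hv : v ∉ l := by simpa using h
    constructor
    · intro hx
      exact ⟨hx, fun he => hv (he ▸ hx)⟩
    · exact fun hx => hx.1

theorem pvSieveInner_sublist (i : Int) :
    ∀ (f : Nat) (j : Int) (l : List Int), (pvSieveInner f i j l).Sublist l := by
  intro f
  induction f with
  | zero => intro j l; simp [pvSieveInner]
  | succ f ih =>
    intro j l
    unfold pvSieveInner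
    split
    · exact (ih (j+1) _).trans (pvRemoveIfMem_sublist l (i*j))
    · exact List.Sublist.refl l

theorem pvSieveOuter_sublist (g : Nat) :
    ∀ (f : Nat) (idx : Nat) (l : List Int), (pvSieveOuter f idx l g).Sublist l := by
  intro f
  induction f with
  | zero => intro idx l; simp [pvSieveOuter]
  | succ f ih =>
    intro idx l
    unfold pvSieveOuter
    cases h : l[idx]? with
    | none => exact List.Sublist.refl l
    | some i => exact (ih (idx+1) _).trans (pvSieveInner_sublist i g 2 l)

-- x survives the sieve if it is not a product of two factors ≥ 2
def pvNotProd (x : Int) : Prop := ∀ a b : Int, 2 ≤ a → 2 ≤ b → x ≠ a * b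

theorem mem_pvSieveInner (i : Int) (hi : 2 ≤ i) (x : Int) (hx : pvNotProd x) :
    ∀ (f : Nat) (j : Int) (l : List Int), 2 ≤ j → x ∈ l → x ∈ pvSieveInner f i j l := by
  intro f
  induction f with
  | zero => intro j l _ hm; simp [pvSieveInner]; exact hm
  | succ f ih =>
    intro j l hj hm
    unfold pvSieveInner
    split
    · refine ih (j+1) _ (by omega) ?_
      have hne : x ≠ i * j := hx i j hi hj
      unfold pvRemoveIfMem
      by_cases h : l.contains (i*j)
      · rw [if_pos h, PySem.List.remove?_eq_some_erase l (i*j) (by simpa using h)]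
        exact (List.mem_erase_of_ne hne).mpr hm
      · rw [if_neg h]; exact hm
    · exact hm

theorem mem_pvSieveOuter (g : Nat) (x : Int) (hx : pvNotProd x) :
    ∀ (f : Nat) (idx : Nat) (l : List Int), (∀ y ∈ l, 2 ≤ y) → x ∈ l →
      x ∈ pvSieveOuter f idx l g := by
  intro f
  induction f with
  | zero => intro idx l _ hm; simpa [pvSieveOuter] using hm
  | succ f ih =>
    intro idx l h2 hm
    unfold pvSieveOuter
    cases h : l[idx]? with
    | none => exact hm
    | some i =>
      have hi : 2 ≤ i := h2 i (List.mem_of_getElem? h)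
      refine ih (idx+1) _ (fun y hy => h2 y ((pvSieveInner_sublist i g 2 l).subset hy)) ?_
      exact mem_pvSieveInner i hi x hx g 2 l (by omega) hm

theorem lastD_mem (l : List Int) (h : l ≠ []) : l.getLast?.getD 0 ∈ l := by
  rw [List.getLast?_eq_some_getLast h]
  simp

-- for a strictly sorted list, every member is ≤ the last element (as read by primes[-1])
theorem mem_le_lastD :
    ∀ (l : List Int), l.Pairwise (· < ·) → ∀ x ∈ l, x ≤ l.getLast?.getD 0 := by
  intro l
  induction l with
  | nil => intro _ x hx; simp at hx
  | cons a t ih =>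
    intro hp x hx
    cases t with
    | nil => simp at hx ⊢; omega
    | cons b s =>
      have hpt : (b :: s).Pairwise (· < ·) := hp.of_cons
      have hlast : (b :: s).getLast?.getD 0 ∈ (b :: s) := lastD_mem _ (by simp)
      rcases List.mem_cons.mp hx with rfl | hx
      · have := (List.pairwise_cons.mp hp).1 _ hlast
        rw [List.getLast?_cons_cons]
        omega
      · have := ih hpt x hx
        rw [List.getLast?_cons_cons]
        exact this

-- the crux: the first pass (i = 2) removes every even number > 2; the invariant says
-- exactly which even numbers have been struck off up to the current j
theorem pvSieveInner_two_even (S : List Int) (hS : S.Pairwise (· < ·)) :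
    ∀ (f : Nat) (j : Int) (l : List Int), l.Sublist S → 2 ≤ j →
      (∀ x ∈ S, x ∈ l ↔ ¬(2 ∣ x ∧ 4 ≤ x ∧ x ≤ 2*(j-1))) →
      ((PySem.List.pyGet? l (-1)).getD 0 + 2 - 2*j).toNat < f →
      ∀ x ∈ pvSieveInner f 2 j l, 2 ∣ x → x ≤ 2 := by
  intro f
  induction f with
  | zero => intro j l _ _ _ hf; omega
  | succ f ih =>
    intro j l hsub hj hinv hf x
    unfold pvSieveInner
    by_cases hc : (2*j : Int) ≤ (PySem.List.pyGet? l (-1)).getD 0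
    · rw [if_pos hc]
      intro hx hdvd
      set l' := pvRemoveIfMem l (2*j) with hl'
      have hnd : l.Nodup := hsub.nodup hS.nodup
      have hsub' : l'.Sublist S := (pvRemoveIfMem_sublist l (2*j)).trans hsub
      have hinv' : ∀ y ∈ S, y ∈ l' ↔ ¬(2 ∣ y ∧ 4 ≤ y ∧ y ≤ 2*((j+1)-1)) := by
        intro y hy
        rw [hl', mem_pvRemoveIfMem_iff l (2*j) y hnd, hinv y hy]
        constructor
        · rintro ⟨h1, h2⟩ ⟨hd, h4, hle⟩
          exact h1 ⟨hd, h4, by omega⟩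
        · intro h
          constructor
          · rintro ⟨hd, h4, hle⟩; exact h ⟨hd, h4, by omega⟩
          · rintro rfl; exact h ⟨⟨j, rfl⟩, by omega, by omega⟩
      rw [PySem.List.pyGet?_neg_one] at hc hf
      have hlf : ((PySem.List.pyGet? l' (-1)).getD 0 + 2 - 2*(j+1)).toNat < f := by
        rw [PySem.List.pyGet?_neg_one]
        by_cases he : l' = []
        · rw [he]; simp; omega
        · have := mem_le_lastD l (List.Pairwise.sublist hsub hS) _
            ((pvRemoveIfMem_sublist l (2*j)).subset (lastD_mem l' he))
          omega
      exact ih (j+1) l' hsub' (by omega) hinv' hlf x hx hdvd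
    · rw [if_neg hc]
      intro hx hdvd
      by_contra hgt
      have hxS : x ∈ S := hsub.subset hx
      have := (hinv x hxS).mp hx
      have hge : 2*j ≤ x := by
        rcases hdvd with ⟨c, rfl⟩
        omega
      have hle := mem_le_lastD l (List.Pairwise.sublist hsub hS) x hx
      rw [PySem.List.pyGet?_neg_one] at hc
      omega

-- notation: the sieve result computed inside squareprimes / primelist
def pvSieve (n : Int) : List Int :=
  pvSieveOuter (n.toNat + 2) 0 (PySem.List.pyRange 2 (n+1) 1) (n.toNat + 2)

theorem pvSieve_sub (n : Int) : (pvSieve n).Sublist (PySem.List.pyRange 2 (n+1) 1) :=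
  pvSieveOuter_sublist _ _ _ _

theorem pvSieve_even (n : Int) (hn : 2 ≤ n) : ∀ x ∈ pvSieve n, 2 ∣ x → x ≤ 2 := by
  intro x hx hdvd
  have hS := PySem.List.pairwise_lt_pyRange_one 2 (n+1)
  have h0 : (PySem.List.pyRange 2 (n+1) 1)[0]? = some 2 := by
    rw [PySem.List.pyRange_one_cons (by omega : (2:Int) < n+1)]
    rfl
  unfold pvSieve at hx
  rw [show n.toNat + 2 = (n.toNat + 1) + 1 from rfl,
      pvSieveOuter_succ_some _ _ _ _ 2 h0] at hx
  -- after the first pass (i = 2) no even number > 2 survives; the rest only removes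
  have hinner : ∀ y ∈ pvSieveInner (n.toNat + 1 + 1) 2 2 (PySem.List.pyRange 2 (n+1) 1),
      2 ∣ y → y ≤ 2 := by
    refine pvSieveInner_two_even _ hS _ 2 _ (List.Sublist.refl _) (by omega) ?_ ?_
    · intro y hy
      have : 2 ≤ y := (PySem.List.mem_pyRange_one.mp hy).1
      constructor
      · intro _ h; omega
      · intro _; exact hy
    · have hlast : PySem.List.pyGet? (PySem.List.pyRange 2 (n+1) 1) (-1) = some n := by
        rw [PySem.List.pyRange_one_succ_right (by omega : (2:Int) ≤ n)]
        exact PySem.List.pyGet?_neg_one_append_singleton _ n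
      rw [hlast]
      simp only [Option.getD_some]
      omega
  exact hinner x ((pvSieveOuter_sublist _ _ _ _).subset hx) hdvd

theorem pvSieve_ge_two (n : Int) : ∀ x ∈ pvSieve n, 2 ≤ x := by
  intro x hx
  exact (PySem.List.mem_pyRange_one.mp ((pvSieve_sub n).subset hx)).1

theorem pvNotProd_two : pvNotProd 2 := by
  intro a b ha hb he
  have : (2:Int)*2 ≤ a*b := mul_le_mul ha hb (by norm_num) (by omega)
  omega

theorem pvNotProd_five : pvNotProd 5 := by
  intro a b ha hb he
  rcases lt_or_ge a 3 with h | h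
  · have ha2 : a = 2 := by omega
    subst ha2; omega
  · have : (3:Int)*2 ≤ a*b := mul_le_mul h hb (by norm_num) (by omega)
    omega

theorem two_mem_pvSieve (n : Int) (hn : 2 ≤ n) : 2 ∈ pvSieve n := by
  refine mem_pvSieveOuter _ 2 pvNotProd_two _ _ _ ?_ ?_
  · intro y hy; exact (PySem.List.mem_pyRange_one.mp hy).1
  · exact PySem.List.mem_pyRange_one.mpr ⟨by omega, by omega⟩

theorem five_mem_pvSieve (n : Int) (hn : 5 ≤ n) : 5 ∈ pvSieve n := by
  refine mem_pvSieveOuter _ 5 pvNotProd_five _ _ _ ?_ ?_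
  · intro y hy; exact (PySem.List.mem_pyRange_one.mp hy).1
  · exact PySem.List.mem_pyRange_one.mpr ⟨by omega, by omega⟩

theorem pvSieve_nodup (n : Int) : (pvSieve n).Nodup :=
  (pvSieve_sub n).nodup (PySem.List.nodup_pyRange_one 2 (n+1))

theorem filter_eq_two (p : Int → Bool) :
    ∀ (l : List Int), l.Nodup → 2 ∈ l → (∀ x ∈ l, p x = true ↔ x = 2) →
      l.filter p = [2] := by
  intro l
  induction l with
  | nil => intro _ h; simp at h
  | cons a t ih =>
    intro hnd hm hp
    rcases List.mem_cons.mp hm with rfl | hm2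
    · have hpa : p 2 = true := (hp 2 (by simp)).mpr rfl
      have h2t : 2 ∉ t := (List.nodup_cons.mp hnd).1
      have ht : t.filter p = [] := by
        rw [List.filter_eq_nil_iff]
        intro x hx hpx
        exact h2t (((hp x (by simp [hx])).mp hpx) ▸ hx)
      simp [hpa, ht]
    · have ha : a ≠ 2 := by
        rintro rfl; exact (List.nodup_cons.mp hnd).1 hm2
      have hpa : p a = false := by
        rcases hb : p a with _ | _
        · rfl
        · exact absurd ((hp a (by simp)).mp hb) ha
      rw [List.filter_cons_of_neg (by simp [hpa])]
      exact ih (List.nodup_cons.mp hnd).2 hm2 (fun x hx => hp x (by simp [hx]))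

theorem squareprimes_eq_alt (n : Int) : squareprimes n = squareprimes_alt n := by
  rcases lt_or_ge n 2 with hn | hn
  · -- n < 2: range(2, n+1) is empty, both loops do nothing
    have hnil : PySem.List.pyRange 2 (n+1) 1 = [] :=
      PySem.List.pyRange_one_eq_nil (by omega)
    unfold squareprimes squareprimes_alt
    rw [hnil, show n.toNat + 2 = (n.toNat + 1) + 1 from rfl,
        pvSieveOuter_succ_none _ _ _ _ (by simp)]
    simp [not_le.mpr hn]
  · -- n ≥ 2: the surviving list contains 2 exactly once, every other element is odd,
    -- 5 is in primelist (n²+1), and no even number > 2 is; so exactly 5 is appended.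
    have hm : (5:Int) ≤ n^2 + 1 := by nlinarith
    unfold squareprimes squareprimes_alt
    rw [if_pos hn]
    show (pvSieve n).foldl
      (fun acc k => if (primelist (n^2+1)).contains (k^2+1) then acc ++ [k^2+1] else acc) [] = [5]
    rw [PySem.List.foldl_append_if]
    have hP : primelist (n^2+1) = pvSieve (n^2+1) := rfl
    have hfilter : (pvSieve n).filter (fun k => (primelist (n^2+1)).contains (k^2+1)) = [2] := by
      refine filter_eq_two _ _ (pvSieve_nodup n) (two_mem_pvSieve n hn) ?_
      intro k hk
      constructor
      · intro hck
        by_contra hne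
        have hk2 : 2 ≤ k := pvSieve_ge_two n k hk
        have hodd : ¬ (2 ∣ k) := by
          intro hd
          exact hne (by have := pvSieve_even n hn k hk hd; omega)
        have hk3 : 3 ≤ k := by omega
        have heven : (2:Int) ∣ (k^2 + 1) := by
          rcases Int.even_or_odd k with he | ho
          · exact absurd he.two_dvd hodd
          · rcases ho with ⟨c, rfl⟩
            exact ⟨2*c^2 + 2*c + 1, by ring⟩
        have hbig : (2:Int) < k^2 + 1 := by nlinarith
        have hmem : (k^2+1) ∈ pvSieve (n^2+1) := by
          rw [← hP]
          exact List.contains_iff_mem.mp hck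
        have := pvSieve_even (n^2+1) (by omega) (k^2+1) hmem heven
        omega
      · rintro rfl
        have h5 : (5:Int) ∈ pvSieve (n^2+1) := five_mem_pvSieve (n^2+1) (by omega)
        rw [hP]
        exact List.contains_iff_mem.mpr (by norm_num; exact h5)
    rw [hfilter]
    norm_num

-- ===== VERDICT (by name: the statement is the Claim_ definition above) =====
theorem squareprimes_spec : Claim_equal_squareprimes := by
  intro n _
  exact squareprimes_eq_alt n
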